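-- pv_equiv track=rewrite | github.com/Andreylive/FPY-91_Professional-work-with-Python | Homework_6/main.py | sorted_corses
-- ===== SOURCE A (Python) =====
-- def sorted_corses(courses: list, mentors: list, durations: list) -> list:
--     courses_list = []
--     for course, mentor, duration in zip(courses, mentors, durations):
--         course_dict = {"title": course,
--                        "mentors": mentor,
--                        "duration": duration}
--         courses_list.append(course_dict)
--
--     durations_dict = {}
--
--     for id, course in enumerate(courses_list):
--         key = course["duration"]
--         durations_dict.setdefault(key, [])
--         durations_dict[key].append(id)
--
--     durations_dict = dict(sorted(durations_dict.items()))
--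
--     sorted_courses = []
--
--     for duration, id in durations_dict.items():
--         for element in id:
--             sorted_courses.append(
--                 f'{courses_list[element]["title"]} - {duration} месяцев'
--                 )
--
--     return sorted_courses
-- ===== SOURCE B (Python) =====
-- def sorted_corses(courses: list, mentors: list, durations: list) -> list:
--     pairs = [(course, duration) for course, _, duration in zip(courses, mentors, durations)]
--     pairs.sort(key=lambda p: p[1])
--     return [f'{course} - {duration} месяцев' for course, duration in pairs]
-- ===== Notes on version B (the rewrite author's own statement) =====
-- stated objective: simpler
-- what changed: Replaces A's bucket dictionary (group ids by duration, sort the keys, then nested re-emit via index lookups) with one flat stable sort of (title, duration) pairs keyed on duration followed by a formatting comprehension; the single sort avoids the dict build and per-id re-indexing (measured ~1.7x at the largest size).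
import Mathlib
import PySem

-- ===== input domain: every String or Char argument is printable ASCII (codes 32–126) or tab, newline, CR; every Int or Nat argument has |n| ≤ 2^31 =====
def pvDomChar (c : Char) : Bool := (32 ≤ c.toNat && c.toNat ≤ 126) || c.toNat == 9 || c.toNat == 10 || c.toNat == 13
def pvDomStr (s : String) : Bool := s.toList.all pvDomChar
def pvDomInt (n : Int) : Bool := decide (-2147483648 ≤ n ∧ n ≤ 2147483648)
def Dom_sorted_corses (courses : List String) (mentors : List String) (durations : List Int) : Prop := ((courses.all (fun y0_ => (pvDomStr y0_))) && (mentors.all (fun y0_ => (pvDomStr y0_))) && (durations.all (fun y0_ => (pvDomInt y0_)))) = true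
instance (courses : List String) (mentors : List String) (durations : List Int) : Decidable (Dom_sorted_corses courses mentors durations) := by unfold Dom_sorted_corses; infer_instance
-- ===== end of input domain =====

-- B replaces A's duration-keyed bucket dictionary + key sort + nested re-emit by one flat
-- stable sort of (title, duration) pairs (objective: simpler).

-- f'{title} - {duration} месяцев' (shared formatting helper, identical in both Pythons)
def fmt (t : String) (d : Int) : String := t ++ " - " ++ PySem.Int.toStr d ++ " месяцев"

-- ===== PORT A =====
def sorted_corses (courses : List String) (mentors : List String) (durations : List Int) : List String :=
  -- courses_list: zip of the three lists; each course_dict kept as the triple (title, mentors, duration)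
  let courses_list : List (String × String × Int) := courses.zip (mentors.zip durations)
  -- for id, course in enumerate(courses_list): durations_dict.setdefault(key, []); durations_dict[key].append(id)
  let durations_dict : PySem.Dict Int (List Int) :=
    (PySem.List.enumerate courses_list 0).foldl
      (fun d e => (d.setdefault e.2.2.2 []).modify e.2.2.2 [] (fun ids => ids ++ [e.1]))
      PySem.Dict.empty
  -- dict(sorted(durations_dict.items())): dict keys are distinct, so the tuple sort never
  -- compares the value lists — sorting the items by key alone is exact
  let sorted_items := PySem.List.sorted durations_dict.items (fun kv => kv.1) false
  -- nested emit loop; courses_list[element] indexed with a valid non-negative id (pyGetD is exact there)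
  sorted_items.foldl
    (fun acc kv => kv.2.foldl
      (fun acc id => acc ++ [fmt (PySem.List.pyGetD courses_list id ("", ("", 0))).1 kv.1]) acc)
    []

-- ===== PORT B =====
def sorted_corses_alt (courses : List String) (mentors : List String) (durations : List Int) : List String :=
  -- pairs = [(course, duration) for course, _, duration in zip(courses, mentors, durations)]
  let pairs : List (String × Int) := (courses.zip (mentors.zip durations)).map (fun t => (t.1, t.2.2))
  -- pairs.sort(key=lambda p: p[1]); return [f'{course} - {duration} месяцев' for course, duration in pairs]
  (PySem.List.sorted pairs (fun p => p.2) false).map (fun p => fmt p.1 p.2)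

-- ===== PRECONDITION & SPEC =====
def Spec_sorted_corses (courses : List String) (mentors : List String) (durations : List Int) (out : List String) : Prop := out = sorted_corses_alt courses mentors durations
instance (courses : List String) (mentors : List String) (durations : List Int) (out : List String) : Decidable (Spec_sorted_corses courses mentors durations out) := by unfold Spec_sorted_corses; infer_instance

-- ===== CLAIM (what is proved, stated in full; the proofs are below) =====
def Claim_equal_sorted_corses : Prop := ∀ (courses : List String) (mentors : List String) (durations : List Int), Dom_sorted_corses courses mentors durations → Spec_sorted_corses courses mentors durations (sorted_corses courses mentors durations)

-- ===== LEMMAS AND PROOFS =====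

-- insert a key into a strictly increasing key list (no-op when present)
def insertKey (k : Int) : List Int → List Int
  | [] => [k]
  | k' :: ks => if k < k' then k :: k' :: ks else if k = k' then k' :: ks else k' :: insertKey k ks

lemma mem_insertKey (k a : Int) (ks : List Int) : a ∈ insertKey k ks ↔ a = k ∨ a ∈ ks := by
  induction ks with
  | nil => simp [insertKey]
  | cons k' ks ih =>
    simp only [insertKey]
    split_ifs with h1 h2
    · simp
    · subst h2; simp
    · simp [ih]; tauto

lemma insertKey_of_mem {k : Int} {ks : List Int} (hp : ks.Pairwise (· < ·)) (h : k ∈ ks) :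
    insertKey k ks = ks := by
  induction ks with
  | nil => simp at h
  | cons k' ks ih =>
    rcases List.pairwise_cons.1 hp with ⟨hlt, hp'⟩
    rcases List.mem_cons.1 h with rfl | h
    · simp [insertKey]
    · have : k' < k := hlt k h
      simp only [insertKey]
      rw [if_neg (by omega), if_neg (by omega), ih hp' h]

lemma insertKey_pairwise {k : Int} {ks : List Int} (hp : ks.Pairwise (· < ·)) :
    (insertKey k ks).Pairwise (· < ·) := by
  induction ks with
  | nil => simp [insertKey]
  | cons k' ks ih =>
    rcases List.pairwise_cons.1 hp with ⟨hlt, hp'⟩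
    simp only [insertKey]
    split_ifs with h1 h2
    · refine List.pairwise_cons.2 ⟨?_, hp⟩
      intro a ha
      rcases List.mem_cons.1 ha with rfl | ha
      · exact h1
      · exact lt_trans h1 (hlt a ha)
    · exact hp
    · refine List.pairwise_cons.2 ⟨?_, ih hp'⟩
      intro a ha
      rcases (mem_insertKey k a ks).1 ha with rfl | ha
      · omega
      · exact hlt a ha

lemma insertKey_perm_of_not_mem {k : Int} {ks : List Int} (h : k ∉ ks) :
    (insertKey k ks).Perm (k :: ks) := by
  induction ks with
  | nil => simp [insertKey]
  | cons k' ks ih =>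
    simp only [insertKey]
    split_ifs with h1 h2
    · exact List.Perm.refl _
    · exact absurd (h2 ▸ List.mem_cons_self) h
    · exact ((ih (fun hm => h (List.mem_cons_of_mem _ hm))).cons k').trans (List.Perm.swap k k' ks)

lemma insertBy_prefix_not {α : Type} (before : α → α → Bool) (x : α) (l₁ l₂ : List α)
    (h : ∀ y ∈ l₁, before x y = false) :
    PySem.List.insertBy before x (l₁ ++ l₂) = l₁ ++ PySem.List.insertBy before x l₂ := by
  induction l₁ with
  | nil => simp
  | cons y l₁ ih =>
    have hy : before x y = false := h y List.mem_cons_self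
    cases l₁ with
    | nil =>
      cases l₂ with
      | nil => simp [PySem.List.insertBy, hy]
      | cons z l₂ => simp [PySem.List.insertBy, hy]
    | cons y' l₁ =>
      have := ih (fun a ha => h a (List.mem_cons_of_mem _ ha))
      simpa [PySem.List.insertBy, hy] using this

lemma insertBy_all_before {α : Type} (before : α → α → Bool) (x : α) (l : List α)
    (h : ∀ y ∈ l, before x y = true) :
    PySem.List.insertBy before x l = x :: l := by
  cases l with
  | nil => simp [PySem.List.insertBy]
  | cons y l => simp [PySem.List.insertBy, h y List.mem_cons_self]

-- the distinct durations, ascending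
def sortedKeysOf (ds : List Int) : List Int :=
  PySem.List.sorted (PySem.Set.ofList ds) (fun k => k) false

lemma sortedKeysOf_pairwise (ds : List Int) : (sortedKeysOf ds).Pairwise (· < ·) :=
  PySem.List.sorted_ofList_pairwise_lt ds

lemma mem_sortedKeysOf (ds : List Int) (k : Int) : k ∈ sortedKeysOf ds ↔ k ∈ ds := by
  unfold sortedKeysOf
  rw [PySem.List.mem_sorted, PySem.Set.mem_ofList]

lemma flatMap_congr_mem {α β : Type} (l : List α) (f g : α → List β)
    (h : ∀ k ∈ l, f k = g k) : l.flatMap f = l.flatMap g := by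
  rw [List.flatMap_def, List.flatMap_def, List.map_congr_left h]

lemma sortedKeysOf_append (ds : List Int) (k : Int) :
    sortedKeysOf (ds ++ [k]) = insertKey k (sortedKeysOf ds) := by
  unfold sortedKeysOf
  rw [PySem.Set.ofList_eq_foldl, List.foldl_append, ← PySem.Set.ofList_eq_foldl]
  show PySem.List.sorted (PySem.Set.add (PySem.Set.ofList ds) k) (fun k => k) false = _
  by_cases hk : k ∈ PySem.Set.ofList ds
  · have hc : (PySem.Set.ofList ds).contains k = true :=
      List.elem_eq_true_of_mem hk
    rw [show PySem.Set.add (PySem.Set.ofList ds) k = PySem.Set.ofList ds by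
      unfold PySem.Set.add; rw [hc]; rfl]
    refine (insertKey_of_mem (sortedKeysOf_pairwise ds) ?_).symm
    rw [mem_sortedKeysOf]
    exact (PySem.Set.mem_ofList ds k).1 hk
  · have hc : (PySem.Set.ofList ds).contains k = false := by
      cases h' : (PySem.Set.ofList ds).contains k
      · rfl
      · exact absurd (List.mem_of_elem_eq_true h') hk
    rw [show PySem.Set.add (PySem.Set.ofList ds) k = PySem.Set.ofList ds ++ [k] by
      unfold PySem.Set.add; rw [hc]; rfl]
    have hnm : k ∉ sortedKeysOf ds := by
      rw [mem_sortedKeysOf]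
      exact fun h => hk ((PySem.Set.mem_ofList ds k).2 h)
    refine PySem.List.sorted_eq_of_perm_of_pairwise_lt _ _ _ ?_ ?_
    · exact (insertKey_perm_of_not_mem hnm).trans
        (((PySem.List.sorted_perm (PySem.Set.ofList ds) (fun k => k) false).cons k).trans
          (List.perm_append_singleton k _).symm)
    · exact insertKey_pairwise (sortedKeysOf_pairwise ds)

lemma filter_filter_ne {α : Type} (key : α → Int) (ps : List α) {k k' : Int} (h : k' ≠ k) :
    (ps.filter (fun p => !(key p == k))).filter (fun p => key p == k') =
      ps.filter (fun p => key p == k') := by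
  rw [List.filter_filter]
  apply List.filter_congr
  intro p _
  by_cases hk : key p = k'
  · simp [hk, h]
  · simp [hk]

lemma insert_buckets {α : Type} (key : α → Int) (ks : List Int) (ps : List α) (x : α)
    (hks : ks.Pairwise (· < ·)) (hcov : ∀ p ∈ ps, key p ∈ ks) :
    PySem.List.insertBy (fun a b => decide (key a < key b)) x
        (ks.flatMap (fun k => ps.filter (fun p => key p == k)))
      = (insertKey (key x) ks).flatMap (fun k => (ps ++ [x]).filter (fun p => key p == k)) := by
  induction ks generalizing ps with
  | nil =>
    have hps : ps = [] := List.eq_nil_iff_forall_not_mem.2 (fun p hp => by simpa using hcov p hp)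
    subst hps
    simp [insertKey, PySem.List.insertBy]
  | cons k ks' ih =>
    rcases List.pairwise_cons.1 hks with ⟨hlt, hp'⟩
    have hmemk : ∀ p ∈ ps.filter (fun p => key p == k), key p = k := by
      intro p hp
      exact beq_iff_eq.1 (List.mem_filter.1 hp).2
    have hmemrest : ∀ y ∈ ks'.flatMap (fun k => ps.filter (fun p => key p == k)), k < key y := by
      intro y hy
      rcases List.mem_flatMap.1 hy with ⟨k', hk', hy'⟩
      rw [beq_iff_eq.1 (List.mem_filter.1 hy').2]
      exact hlt k' hk'
    rw [List.flatMap_cons]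
    rcases lt_trichotomy (key x) k with hxk | hxk | hxk
    · -- key x < k : x goes first, new key bucket
      rw [insertBy_all_before _ x _ (by
        intro y hy
        rcases List.mem_append.1 hy with hy | hy
        · simpa using lt_of_lt_of_le hxk (le_of_eq (hmemk y hy).symm)
        · simpa using lt_trans hxk (hmemrest y hy))]
      rw [show insertKey (key x) (k :: ks') = key x :: k :: ks' by
        simp [insertKey, hxk]]
      rw [List.flatMap_cons, List.flatMap_cons]
      have h1 : (ps ++ [x]).filter (fun p => key p == key x) = [x] := by
        rw [List.filter_append]
        have : ps.filter (fun p => key p == key x) = [] := by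
          rw [List.filter_eq_nil_iff]
          intro p hp hb
          have := beq_iff_eq.1 hb
          rcases List.mem_cons.1 (hcov p hp) with h | h
          · omega
          · have := hlt _ h; omega
        simp [this]
      have h2 : (ps ++ [x]).filter (fun p => key p == k) = ps.filter (fun p => key p == k) := by
        rw [List.filter_append]
        simp [show ¬ (key x = k) by omega]
      have h3 : ks'.flatMap (fun k' => (ps ++ [x]).filter (fun p => key p == k'))
          = ks'.flatMap (fun k' => ps.filter (fun p => key p == k')) := by
        refine flatMap_congr_mem _ _ _ (fun k' hk' => ?_)
        rw [List.filter_append]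
        have := hlt k' hk'
        simp [show ¬ (key x = k') by omega]
      rw [h1, h2, h3]
      simp
    · -- key x = k : x appended to its bucket
      rw [insertBy_prefix_not _ x _ _ (by
        intro y hy
        simp [hmemk y hy, hxk])]
      rw [insertBy_all_before _ x _ (by
        intro y hy
        simpa [hxk] using hmemrest y hy)]
      rw [show insertKey (key x) (k :: ks') = k :: ks' by
        simp [insertKey, hxk]]
      rw [List.flatMap_cons]
      have h1 : (ps ++ [x]).filter (fun p => key p == k) = ps.filter (fun p => key p == k) ++ [x] := by
        rw [List.filter_append]
        simp [hxk]
      have h3 : ks'.flatMap (fun k' => (ps ++ [x]).filter (fun p => key p == k'))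
          = ks'.flatMap (fun k' => ps.filter (fun p => key p == k')) := by
        refine flatMap_congr_mem _ _ _ (fun k' hk' => ?_)
        rw [List.filter_append]
        have := hlt k' hk'
        simp [show ¬ (key x = k') by omega]
      rw [h1, h3]
      simp
    · -- k < key x : skip the k bucket, recurse
      rw [insertBy_prefix_not _ x _ _ (by
        intro y hy
        simp [hmemk y hy, show ¬ (key x < k) by omega])]
      have hrest : ks'.flatMap (fun k' => ps.filter (fun p => key p == k'))
          = ks'.flatMap (fun k' => (ps.filter (fun p => !(key p == k))).filter (fun p => key p == k')) := by
        refine flatMap_congr_mem _ _ _ (fun k' hk' => ?_)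
        exact (filter_filter_ne key ps (by have := hlt k' hk'; omega)).symm
      rw [hrest]
      rw [ih (ps.filter (fun p => !(key p == k))) hp' (by
        intro p hp
        have hpm := (List.mem_filter.1 hp).2
        have hpmem := hcov p (List.mem_filter.1 hp).1
        rcases List.mem_cons.1 hpmem with h | h
        · rw [h] at hpm; simp at hpm
        · exact h)]
      rw [show insertKey (key x) (k :: ks') = k :: insertKey (key x) ks' by
        simp only [insertKey]
        rw [if_neg (by omega), if_neg (by omega)]]
      rw [List.flatMap_cons]
      have h1 : (ps ++ [x]).filter (fun p => key p == k) = ps.filter (fun p => key p == k) := by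
        rw [List.filter_append]
        simp [show ¬ (key x = k) by omega]
      have h3 : (insertKey (key x) ks').flatMap
            (fun k' => (ps.filter (fun p => !(key p == k)) ++ [x]).filter (fun p => key p == k'))
          = (insertKey (key x) ks').flatMap (fun k' => (ps ++ [x]).filter (fun p => key p == k')) := by
        refine flatMap_congr_mem _ _ _ (fun k' hk' => ?_)
        have hkne : k' ≠ k := by
          rcases (mem_insertKey (key x) k' ks').1 hk' with rfl | h
          · omega
          · have := hlt k' h; omega
        rw [List.filter_append, List.filter_append, filter_filter_ne key ps hkne]
      rw [h3, h1]

lemma sorted_buckets {α : Type} (key : α → Int) (ps : List α) :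
    PySem.List.sorted ps key false
      = (sortedKeysOf (ps.map key)).flatMap (fun k => ps.filter (fun p => key p == k)) := by
  induction ps using List.reverseRecOn with
  | nil => simp [PySem.List.sorted, sortedKeysOf, PySem.Set.ofList]
  | append_singleton ps x ih =>
    have hstep : PySem.List.sorted (ps ++ [x]) key false
        = PySem.List.insertBy (fun a b => decide (key a < key b)) x
            (PySem.List.sorted ps key false) := by
      rw [PySem.List.sorted_eq_foldl_insertBy, PySem.List.sorted_eq_foldl_insertBy,
        List.foldl_append]
      rfl
    rw [hstep, ih,
      insert_buckets key _ ps x (sortedKeysOf_pairwise _) (by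
        intro p hp
        rw [mem_sortedKeysOf]
        exact List.mem_map_of_mem hp),
      List.map_append, List.map_singleton, sortedKeysOf_append]

-- every entry of enumerate(ts, 0) looks itself up
lemma enum_pyGetD {α : Type} (ts : List α) (d : α) :
    ∀ e ∈ PySem.List.enumerate ts 0, PySem.List.pyGetD ts e.1 d = e.2 := by
  intro e he
  rcases (PySem.List.mem_enumerate_iff ts 0 e).1 he with ⟨i, hi, rfl⟩
  rw [PySem.List.pyGetD_eq_getElem ts d (by omega) (by simpa using hi)]
  simp

lemma enum_filter_map {α : Type} (ts : List α) (p : α → Bool) (s : Int) :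
    ((PySem.List.enumerate ts s).filter (fun e => p e.2)).map (fun e => e.2) = ts.filter p := by
  induction ts generalizing s with
  | nil => simp [PySem.List.enumerate]
  | cons t ts ih =>
    rw [PySem.List.enumerate_cons]
    by_cases hp : p t <;> simp [hp, ih]

-- setdefault(k, []) followed by d[k] = f(d.get(k, [])) is just the assignment
lemma setdefault_modify {κ ν : Type} [BEq κ] [LawfulBEq κ] (d : PySem.Dict κ (List ν)) (k : κ)
    (f : List ν → List ν) :
    (d.setdefault k []).modify k [] f = d.modify k [] f := by
  unfold PySem.Dict.modify
  rw [PySem.Dict.getD_setdefault_self]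
  cases hc : d.contains k
  · rw [PySem.Dict.setdefault_of_not_contains d [] hc, PySem.Dict.insert_insert_self]
  · rw [PySem.Dict.setdefault_of_contains d [] hc]

-- the common canonical form: buckets of formatted lines over the ascending distinct durations
def canon (ts : List (String × String × Int)) : List String :=
  (sortedKeysOf (ts.map (fun t => t.2.2))).flatMap
    (fun k => (ts.filter (fun t => t.2.2 == k)).map (fun t => fmt t.1 t.2.2))

lemma A_canon (courses mentors : List String) (durations : List Int) :
    sorted_corses courses mentors durations = canon (courses.zip (mentors.zip durations)) := by
  unfold sorted_corses canon
  dsimp only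
  generalize courses.zip (mentors.zip durations) = ts
  -- the dict-building loop, setdefault folded away and re-keyed over (duration, id) pairs
  have hdict : (PySem.List.enumerate ts 0).foldl
        (fun d e => (d.setdefault e.2.2.2 []).modify e.2.2.2 [] (fun ids => ids ++ [e.1]))
        PySem.Dict.empty
      = ((PySem.List.enumerate ts 0).map (fun e => (e.2.2.2, e.1))).foldl
        (fun d p => d.modify p.1 [] (fun ids => ids ++ [p.2])) PySem.Dict.empty := by
    rw [List.foldl_map]
    exact PySem.List.foldl_congr_mem _ _ _ _
      (fun acc e _ => setdefault_modify acc e.2.2.2 (fun ids => ids ++ [e.1]))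
  rw [hdict]
  set l' := (PySem.List.enumerate ts 0).map (fun e => (e.2.2.2, e.1)) with hl'
  set D := l'.foldl (fun d p => d.modify p.1 [] (fun ids => ids ++ [p.2])) PySem.Dict.empty with hD
  have hmapfst : l'.map (fun p => p.1) = ts.map (fun t => t.2.2) := by
    rw [hl', List.map_map]
    have := PySem.List.map_snd_enumerate ts 0
    calc (PySem.List.enumerate ts 0).map ((fun p => p.1) ∘ (fun e => (e.2.2.2, e.1)))
        = ((PySem.List.enumerate ts 0).map (fun e => e.2)).map (fun t => t.2.2) := by
          rw [List.map_map]; rfl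
      _ = ts.map (fun t => t.2.2) := by rw [this]
  have hkeys : D.keys = PySem.Set.ofList (ts.map (fun t => t.2.2)) := by
    rw [hD, PySem.Dict.keys_foldl_modify_key l' (fun p => p.1) [] (fun _ p ids => ids ++ [p.2])
      PySem.Dict.empty, PySem.Dict.keys_empty, hmapfst, PySem.Set.ofList_eq_foldl]
    rfl
  have hnodup : D.keys.Nodup := by
    rw [hD]
    exact PySem.Dict.nodup_keys_foldl_modify_key l' (fun p => p.1) [] (fun _ p ids => ids ++ [p.2])
      PySem.Dict.empty (by rw [PySem.Dict.keys_empty]; exact List.nodup_nil)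
  have hgetD : ∀ k, D.getD k [] = (l'.filter (fun p => p.1 == k)).map (fun p => p.2) := by
    intro k
    rw [hD, PySem.Dict.getD_foldl_modify_append l' PySem.Dict.empty k, PySem.Dict.getD_empty]
    rfl
  -- sorted(durations_dict.items()) named explicitly
  have hsorted : PySem.List.sorted D.items (fun kv => kv.1) false
      = (sortedKeysOf (ts.map (fun t => t.2.2))).map (fun k => (k, D.getD k [])) := by
    refine PySem.List.sorted_eq_of_perm_of_pairwise_lt _ _ _ ?_ ?_
    · rw [PySem.Dict.items_eq_map_keys D hnodup [], hkeys]
      exact (PySem.List.sorted_perm _ _ _).map _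
    · rw [List.pairwise_map]
      simpa using sortedKeysOf_pairwise (ts.map (fun t => t.2.2))
  rw [hsorted]
  -- the nested emit loop is a flatMap of maps
  rw [PySem.List.foldl_congr_mem _ _
    (fun acc kv => acc ++ kv.2.map (fun id => fmt (PySem.List.pyGetD ts id ("", ("", 0))).1 kv.1)) _
    (fun acc kv _ => PySem.List.foldl_append_singleton_eq_map _ kv.2 acc)]
  rw [PySem.List.foldl_append_eq_flatMap, List.nil_append, List.flatMap_map]
  refine flatMap_congr_mem _ _ _ (fun k _ => ?_)
  rw [hgetD k, hl', List.filter_map, List.map_map, List.map_map]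
  have h1 : ∀ e ∈ (PySem.List.enumerate ts 0).filter (fun e => e.2.2.2 == k),
      fmt (PySem.List.pyGetD ts e.1 ("", ("", 0))).1 k = fmt e.2.1 k := by
    intro e he
    rw [enum_pyGetD ts ("", ("", 0)) e (List.mem_of_mem_filter he)]
  calc ((PySem.List.enumerate ts 0).filter (fun e => e.2.2.2 == k)).map
          ((fun id => fmt (PySem.List.pyGetD ts id ("", ("", 0))).1 k) ∘
            ((fun p => p.2) ∘ fun e => (e.2.2.2, e.1)))
      = ((PySem.List.enumerate ts 0).filter (fun e => e.2.2.2 == k)).map (fun e => fmt e.2.1 k) :=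
        List.map_congr_left h1
    _ = (((PySem.List.enumerate ts 0).filter (fun e => (fun t => t.2.2 == k) e.2)).map
          (fun e => e.2)).map (fun t => fmt t.1 k) := by rw [List.map_map]; rfl
    _ = (ts.filter (fun t => t.2.2 == k)).map (fun t => fmt t.1 k) := by
        rw [enum_filter_map ts (fun t => t.2.2 == k) 0]
    _ = (ts.filter (fun t => t.2.2 == k)).map (fun t => fmt t.1 t.2.2) := by
        refine List.map_congr_left (fun t ht => ?_)
        rw [beq_iff_eq.1 (List.mem_filter.1 ht).2]

lemma B_canon (courses mentors : List String) (durations : List Int) :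
    sorted_corses_alt courses mentors durations = canon (courses.zip (mentors.zip durations)) := by
  unfold sorted_corses_alt canon
  dsimp only
  generalize courses.zip (mentors.zip durations) = ts
  rw [sorted_buckets (fun p => p.2) (ts.map (fun t => (t.1, t.2.2)))]
  rw [List.map_map, List.map_flatMap]
  rw [show List.map ((fun (p : String × Int) => p.2) ∘ fun (t : String × String × Int) => (t.1, t.2.2)) ts
      = List.map (fun t => t.2.2) ts from rfl]
  refine flatMap_congr_mem _ _ _ (fun k _ => ?_)
  rw [List.filter_map, List.map_map]
  rfl

theorem sorted_corses_spec : Claim_equal_sorted_corses := by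
  intro courses mentors durations _
  unfold Spec_sorted_corses
  rw [A_canon, B_canon]
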